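-- pv_equiv track=rewrite | github.com/lemurey/advent_of_code | 2017/day07.py | get_different_element
-- ===== SOURCE A (Python) =====
-- def get_different_element(array):
--     check = array[0]
--     test = [x == check for x in array[1:]]
--     if all(test):
--         return -1
--     if not any(test):
--         return 0
--     return test.index(False) + 1
-- ===== SOURCE B (Python) =====
-- def get_different_element(array):
--     check = array[0]
--     any_same = False
--     first_diff = -1
--     for i, x in enumerate(array[1:], 1):
--         if x == check:
--             any_same = True
--         elif first_diff == -1:
--             first_diff = i
--     if first_diff == -1:
--         return -1
--     if not any_same:
--         return 0
--     return first_diff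
-- ===== Notes on version B (the rewrite author's own statement) =====
-- stated objective: alternative
-- what changed: Replaces the materialised boolean comparison list plus three separate scans (all, any, index) with a single accumulating pass over array[1:] that tracks whether any later element equals array[0] and the 1-based index of the first differing one.
import Mathlib
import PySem

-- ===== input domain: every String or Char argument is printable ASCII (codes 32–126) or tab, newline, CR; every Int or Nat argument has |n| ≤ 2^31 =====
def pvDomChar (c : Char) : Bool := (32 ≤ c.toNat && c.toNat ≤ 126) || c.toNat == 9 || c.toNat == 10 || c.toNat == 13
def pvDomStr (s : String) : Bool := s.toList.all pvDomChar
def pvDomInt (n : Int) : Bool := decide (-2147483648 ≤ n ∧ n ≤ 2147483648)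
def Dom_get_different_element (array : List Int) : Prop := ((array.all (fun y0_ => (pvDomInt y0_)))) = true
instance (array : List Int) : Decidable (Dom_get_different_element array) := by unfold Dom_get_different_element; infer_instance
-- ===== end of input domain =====

-- B replaces A's intermediate comparison list and three scans (all/any/index) by one
-- single accumulating pass (alternative decomposition, same cost); equivalence is proved
-- on nonempty lists (A raises IndexError on []).

-- ===== PORT A =====
def get_different_element (array : List Int) : Int :=
  match array with
  | [] => 0  -- unreachable under Pre_ (array[0] raises IndexError)
  | check :: tail =>
    let test := tail.map (fun x => x == check)
    if test.all (fun b => b) then -1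
    else if !(test.any (fun b => b)) then 0
    else
      match PySem.List.index? test false with
      | some i => (i : Int) + 1
      | none => 0  -- unreachable: all false ⇒ false ∈ test

-- ===== PORT B =====
def gdeLoop (check : Int) : List Int → Int → Bool → Int → Bool × Int
  | [], _, any_same, first_diff => (any_same, first_diff)
  | x :: xs, i, any_same, first_diff =>
    if x == check then gdeLoop check xs (i + 1) true first_diff
    else if first_diff == -1 then gdeLoop check xs (i + 1) any_same i
    else gdeLoop check xs (i + 1) any_same first_diff

def get_different_element_alt (array : List Int) : Int :=
  match array with
  | [] => 0  -- unreachable under Pre_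
  | check :: tail =>
    let r := gdeLoop check tail 1 false (-1)
    if r.2 == -1 then -1
    else if !r.1 then 0
    else r.2

-- ===== PRECONDITION & SPEC =====
-- Pre_ excludes only the empty list, on which A raises IndexError (array[0]).
def Pre_get_different_element (array : List Int) : Prop := array ≠ []
instance (array : List Int) : Decidable (Pre_get_different_element array) := by
  unfold Pre_get_different_element; infer_instance

def pvWitness_get_different_element : List Int := [3, 3, 5, 3]

def Spec_get_different_element (array : List Int) (out : Int) : Prop := out = get_different_element_alt array
instance (array : List Int) (out : Int) : Decidable (Spec_get_different_element array out) := by unfold Spec_get_different_element; infer_instance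

-- ===== CLAIM (what is proved, stated in full; the proofs are below) =====
def Claim_equal_get_different_element : Prop := ∀ (array : List Int), Dom_get_different_element array → Pre_get_different_element array → Spec_get_different_element array (get_different_element array)

-- ===== LEMMAS AND PROOFS =====

theorem gdeLoop_fst (check : Int) (xs : List Int) (i : Int) (a : Bool) (fd : Int) :
    (gdeLoop check xs i a fd).1 = (a || xs.any (fun x => x == check)) := by
  induction xs generalizing i a fd with
  | nil => simp [gdeLoop]
  | cons x xs ih =>
    simp only [gdeLoop, List.any_cons]
    by_cases h : x = check
    · simp [h, ih]
    · have hb : (x == check) = false := by simp [h]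
      rw [hb]
      simp only [Bool.false_eq_true, if_false, Bool.false_or]
      split_ifs <;> exact ih _ _ _

theorem gdeLoop_snd_ne (check : Int) (xs : List Int) (i : Int) (a : Bool) (fd : Int)
    (h : fd ≠ -1) : (gdeLoop check xs i a fd).2 = fd := by
  induction xs generalizing i a with
  | nil => simp [gdeLoop]
  | cons x xs ih =>
    simp only [gdeLoop]
    split_ifs with h1 h2
    · exact ih _ _
    · simp at h2; exact absurd h2 h
    · exact ih _ _

theorem idx_cons_true (l : List Bool) :
    PySem.List.index? (true :: l) false = (PySem.List.index? l false).map (· + 1) :=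
  PySem.List.index?_cons_of_ne l (by decide)

theorem idx_cons_false (l : List Bool) :
    PySem.List.index? (false :: l) false = some 0 :=
  PySem.List.index?_cons_self false l

theorem gdeLoop_snd (check : Int) (xs : List Int) (i : Int) (a : Bool) (hi : 0 ≤ i) :
    (gdeLoop check xs i a (-1)).2 =
      (match PySem.List.index? (xs.map (fun x => x == check)) false with
       | some j => i + (j : Int)
       | none => -1) := by
  induction xs generalizing i a with
  | nil => simp [gdeLoop, PySem.List.index?]
  | cons x xs ih =>
    simp only [gdeLoop, List.map_cons]
    by_cases h : x = check
    · have hb : (x == check) = true := by simp [h]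
      rw [hb, if_pos rfl]
      rw [idx_cons_true]
      rw [ih (i + 1) true (by omega)]
      cases hj : PySem.List.index? (xs.map (fun x => x == check)) false with
      | none => simp
      | some j => simp; ring
    · have hb : (x == check) = false := by simp [h]
      rw [hb]
      simp only [Bool.false_eq_true, if_false, beq_self_eq_true, if_pos]
      rw [idx_cons_false]
      rw [gdeLoop_snd_ne check xs (i+1) a i (by omega)]
      simp

theorem all_iff_index?_none (l : List Bool) :
    (l.all (fun b => b) = true) ↔ PySem.List.index? l false = none := by
  rw [PySem.List.index?_eq_none_iff]
  constructor
  · intro h hf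
    have := List.all_eq_true.mp h false hf
    simp at this
  · intro h
    apply List.all_eq_true.mpr
    intro b hb
    cases b with
    | true => rfl
    | false => exact absurd hb h

-- ===== VERDICT (by name: the statement is the Claim_ definition above) =====
theorem get_different_element_spec : Claim_equal_get_different_element := by
  intro array _ hpre
  unfold Spec_get_different_element
  match array with
  | [] => exact absurd rfl hpre
  | check :: tail =>
    simp only [get_different_element, get_different_element_alt]
    rw [gdeLoop_fst, gdeLoop_snd check tail 1 false (by norm_num)]
    cases hj : PySem.List.index? (tail.map (fun x => x == check)) false with
    | none =>
      have hall : (tail.map (fun x => x == check)).all (fun b => b) = true :=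
        (all_iff_index?_none _).mpr hj
      simp [hall]
    | some j =>
      have hall : ¬ ((tail.map (fun x => x == check)).all (fun b => b) = true) := by
        rw [all_iff_index?_none, hj]; simp
      have hfd : (1 + (j : Int)) ≠ -1 := by omega
      have hany : (tail.map (fun x => x == check)).any (fun b => b) = tail.any (fun x => x == check) := by
        simp [List.any_map, Function.comp_def]
      rw [if_neg hall]
      have hbe : ((1 + (j : Int)) == -1) = false := by simp [hfd]
      rw [hbe]
      simp only [Bool.false_eq_true, if_false, hany]
      by_cases ha : tail.any (fun x => x == check) = true
      · simp only [ha, Bool.false_or, Bool.not_true, Bool.false_eq_true, if_false]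
        exact add_comm _ _
      · simp only [Bool.not_eq_true] at ha; simp [ha]
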